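-- pv_equiv track=rewrite | github.com/dahee325/algo | X숨어있는숫자의덧셈2/sol.py | solution
-- ===== SOURCE A (Python) =====
-- def solution(my_string):
--     answer = []
--     for i in range(0, len(my_string)):
--         if my_string[i].isdigit():
--             if i == 0:
--                 answer.append(int(my_string[0]))
--             elif my_string[i-1].isdigit():
--                 answer.append(int(''.join([my_string[i-1], my_string[i]])))
--             else:
--                 answer.append(int(my_string[i]))
--     return sum(answer)
-- ===== SOURCE B (Python) =====
-- def solution(my_string):
--     # Partition into maximal digit runs, then score each run:
--     # first digit alone, then each adjacent pair as a two-digit number.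
--     runs = []
--     cur = ''
--     for ch in my_string:
--         if ch.isdigit():
--             cur += ch
--         else:
--             if cur:
--                 runs.append(cur)
--             cur = ''
--     if cur:
--         runs.append(cur)
--     total = 0
--     for g in runs:
--         total += int(g[0])
--         for j in range(1, len(g)):
--             total += int(g[j-1:j+1])
--     return total
-- ===== Notes on version B (the rewrite author's own statement) =====
-- stated objective: alternative
-- what changed: A does a single index-based scan with a look-back at my_string[i-1] for every digit position; B first partitions the string into maximal runs of consecutive digits and then scores each run separately (first digit alone, each adjacent pair as a two-digit number).
import Mathlib
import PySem

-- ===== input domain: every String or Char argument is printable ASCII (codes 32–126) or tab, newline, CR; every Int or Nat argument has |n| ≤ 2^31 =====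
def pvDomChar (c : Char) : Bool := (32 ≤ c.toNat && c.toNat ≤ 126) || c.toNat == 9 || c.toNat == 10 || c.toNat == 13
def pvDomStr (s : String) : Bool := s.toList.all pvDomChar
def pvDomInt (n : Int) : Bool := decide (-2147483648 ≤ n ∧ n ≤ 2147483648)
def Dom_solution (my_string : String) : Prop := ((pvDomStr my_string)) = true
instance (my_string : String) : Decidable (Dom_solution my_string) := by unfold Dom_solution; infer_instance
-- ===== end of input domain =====

-- B re-implements A by first partitioning the string into maximal digit runs and then
-- scoring each run, instead of A's index-based look-back scan; objective: alternative
-- decomposition (same O(n) cost).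


-- ===== PORT A =====
-- my_string[i] with 0 ≤ i < len is ported as cs.getD i ' ' (in-range, so exact);
-- int(<digit chars>) is PySem.Int.ofChars? with .getD 0 (the isdigit guard makes it `some`,
-- so Python's int() cannot raise on the guarded branches).
def solution (my_string : String) : Int :=
  let cs := my_string.toList
  let answer : List Int :=
    (List.range cs.length).foldl
      (fun answer i =>
        if PySem.Chars.isdigit (cs.getD i ' ') then
          if i = 0 then
            answer ++ [(PySem.Int.ofChars? [cs.getD 0 ' ']).getD 0]
          else if PySem.Chars.isdigit (cs.getD (i - 1) ' ') then
            answer ++ [(PySem.Int.ofChars? [cs.getD (i - 1) ' ', cs.getD i ' ']).getD 0]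
          else
            answer ++ [(PySem.Int.ofChars? [cs.getD i ' ']).getD 0]
        else answer)
      []
  answer.sum

-- ===== PORT B =====
-- g[0] on a non-empty run g is g.headD ' ' (exact); g[j-1:j+1] is PySem.List.slice;
-- range(1, len(g)) is List.range' 1 (len g - 1); int() as in port A (guarded, cannot raise).
def solution_alt (my_string : String) : Int :=
  let st := my_string.toList.foldl
      (fun (st : List (List Char) × List Char) ch =>
        if PySem.Chars.isdigit ch then (st.1, st.2 ++ [ch])
        else (if st.2 ≠ [] then st.1 ++ [st.2] else st.1, []))
      ([], [])
  let runs := if st.2 ≠ [] then st.1 ++ [st.2] else st.1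
  runs.foldl
    (fun total g =>
      let total := total + (PySem.Int.ofChars? [g.headD ' ']).getD 0
      (List.range' 1 (g.length - 1)).foldl
        (fun (total : Int) (j : Nat) =>
          total + (PySem.Int.ofChars? (PySem.List.slice g (some ((j : Int) - 1)) (some ((j : Int) + 1)))).getD 0)
        total)
    0

-- ===== PRECONDITION & SPEC =====
def Spec_solution (my_string : String) (out : Int) : Prop := out = solution_alt my_string
instance (my_string : String) (out : Int) : Decidable (Spec_solution my_string out) := by unfold Spec_solution; infer_instance

-- ===== CLAIM (what is proved, stated in full; the proofs are below) =====
def Claim_equal_solution : Prop := ∀ (my_string : String), Dom_solution my_string → Spec_solution my_string (solution my_string)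

-- ===== LEMMAS AND PROOFS =====

-- digit value of a digit character
def pvDv (c : Char) : Int := (c.toNat : Int) - 48

-- contribution of one character given the previous character (A's per-index rule)
def pvCtb (p? : Option Char) (c : Char) : Int :=
  if PySem.Chars.isdigit c then
    match p? with
    | some p => if PySem.Chars.isdigit p then 10 * pvDv p + pvDv c else pvDv c
    | none => pvDv c
  else 0

-- reference scan: total contribution of a list given the previous character
def pvGo (p? : Option Char) : List Char → Int
  | [] => 0
  | c :: t => pvCtb p? c + pvGo (some c) t

-- the digit-run builder that B's first loop computes
def pvBuild (cur : List Char) : List Char → List (List Char)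
  | [] => if cur ≠ [] then [cur] else []
  | c :: t =>
    if PySem.Chars.isdigit c then pvBuild (cur ++ [c]) t
    else (if cur ≠ [] then [cur] else []) ++ pvBuild [] t

-- score of one run, as B's inner loop computes it
def pvPair (g : List Char) (j : Nat) : Int :=
  (PySem.Int.ofChars? (PySem.List.slice g (some ((j : Int) - 1)) (some ((j : Int) + 1)))).getD 0

def pvScore (g : List Char) : Int :=
  (PySem.Int.ofChars? [g.headD ' ']).getD 0 + ((List.range' 1 (g.length - 1)).map (pvPair g)).sum

def pvSB (cur : List Char) : Int := if cur ≠ [] then pvScore cur else 0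

theorem pv_digit1 (c : Char) (h : PySem.Chars.isdigit c = true) :
    PySem.Int.ofChars? [c] = some (pvDv c) := by
  simp [PySem.Chars.isdigit, Char.le_def] at h
  have hlo : 48 ≤ c.toNat := h.1
  have hhi : c.toNat ≤ 57 := h.2
  rw [show c = Char.ofNat c.toNat from (Char.ofNat_toNat c).symm]
  obtain ⟨n, hn, hlo', hhi'⟩ : ∃ n, c.toNat = n ∧ 48 ≤ n ∧ n ≤ 57 := ⟨_, rfl, hlo, hhi⟩
  unfold pvDv
  rw [hn]
  interval_cases n <;> decide

theorem pv_digit2 (p c : Char) (hp : PySem.Chars.isdigit p = true) (h : PySem.Chars.isdigit c = true) :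
    PySem.Int.ofChars? [p, c] = some (10 * pvDv p + pvDv c) := by
  simp [PySem.Chars.isdigit, Char.le_def] at h hp
  have hlo : 48 ≤ c.toNat := h.1
  have hhi : c.toNat ≤ 57 := h.2
  have plo : 48 ≤ p.toNat := hp.1
  have phi : p.toNat ≤ 57 := hp.2
  rw [show c = Char.ofNat c.toNat from (Char.ofNat_toNat c).symm,
      show p = Char.ofNat p.toNat from (Char.ofNat_toNat p).symm]
  obtain ⟨n, hn, hlo', hhi'⟩ : ∃ n, c.toNat = n ∧ 48 ≤ n ∧ n ≤ 57 := ⟨_, rfl, hlo, hhi⟩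
  obtain ⟨m, hm, plo', phi'⟩ : ∃ m, p.toNat = m ∧ 48 ≤ m ∧ m ≤ 57 := ⟨_, rfl, plo, phi⟩
  unfold pvDv
  rw [hn, hm]
  interval_cases n <;> interval_cases m <;> decide

theorem pv_go_append (ds : List Char) (p? : Option Char) (c : Char) :
    pvGo p? (ds ++ [c]) = pvGo p? ds + pvCtb (ds.getLast?.or p?) c := by
  induction ds generalizing p? with
  | nil => simp [pvGo]
  | cons d t ih =>
      have hlast : (d :: t).getLast?.or p? = t.getLast?.or (some d) := by
        cases t with
        | nil => simp
        | cons e u =>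
            rcases h : (e :: u).getLast? with _ | x
            · exact absurd h (by simp)
            · rw [List.getLast?_cons_cons, h]; rfl
      simp only [List.cons_append, pvGo, ih (some d), hlast]
      ring

theorem pv_go_skip (c : Char) (t : List Char) (h : PySem.Chars.isdigit c = false) :
    pvGo (some c) t = pvGo none t := by
  cases t with
  | nil => rfl
  | cons c' u => simp [pvGo, pvCtb, h]

-- ---- A side ----
def pvCtbA (cs : List Char) (i : Nat) : Int :=
  pvCtb (if i = 0 then none else some (cs.getD (i - 1) ' ')) (cs.getD i ' ')

theorem pv_A_foldl (cs : List Char) (l : List Nat) (a : List Int) :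
    (l.foldl
      (fun answer i =>
        if PySem.Chars.isdigit (cs.getD i ' ') then
          if i = 0 then
            answer ++ [(PySem.Int.ofChars? [cs.getD 0 ' ']).getD 0]
          else if PySem.Chars.isdigit (cs.getD (i - 1) ' ') then
            answer ++ [(PySem.Int.ofChars? [cs.getD (i - 1) ' ', cs.getD i ' ']).getD 0]
          else
            answer ++ [(PySem.Int.ofChars? [cs.getD i ' ']).getD 0]
        else answer) a).sum = a.sum + (l.map (pvCtbA cs)).sum := by
  induction l generalizing a with
  | nil => simp
  | cons i t ih =>
      rw [List.foldl_cons, ih, List.map_cons, List.sum_cons]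
      have hstep :
          (if PySem.Chars.isdigit (cs.getD i ' ') then
            if i = 0 then
              a ++ [(PySem.Int.ofChars? [cs.getD 0 ' ']).getD 0]
            else if PySem.Chars.isdigit (cs.getD (i - 1) ' ') then
              a ++ [(PySem.Int.ofChars? [cs.getD (i - 1) ' ', cs.getD i ' ']).getD 0]
            else
              a ++ [(PySem.Int.ofChars? [cs.getD i ' ']).getD 0]
          else a).sum = a.sum + pvCtbA cs i := by
        unfold pvCtbA
        by_cases h0 : i = 0
        · subst h0
          generalize cs.getD 0 ' ' = x
          by_cases hd : PySem.Chars.isdigit x = true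
          · simp [pvCtb, hd, pv_digit1 x hd]
          · simp [pvCtb, hd]
        · simp only [if_neg h0]
          generalize cs.getD 0 ' ' = y
          generalize hpx : cs.getD (i - 1) ' ' = p
          generalize cs.getD i ' ' = x
          by_cases hd : PySem.Chars.isdigit x = true
          · by_cases hp : PySem.Chars.isdigit p = true
            · simp [pvCtb, hd, hp, pv_digit2 p x hp hd]
            · simp [pvCtb, hd, hp, pv_digit1 x hd]
          · simp [pvCtb, hd]
      rw [hstep]; ring
  
theorem pv_last_getD (ds : List Char) (h : ds ≠ []) :
    ds.getLast? = some (ds.getD (ds.length - 1) ' ') := by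
  have hlt : ds.length - 1 < ds.length := by
    cases ds with
    | nil => exact absurd rfl h
    | cons d t => simp
  rw [List.getLast?_eq_getElem?, List.getElem?_eq_getElem hlt, List.getD_eq_getElem _ _ hlt]

theorem pv_range_sum (cs : List Char) :
    ((List.range cs.length).map (pvCtbA cs)).sum = pvGo none cs := by
  induction cs using List.reverseRecOn with
  | nil => simp [pvGo]
  | append_singleton ds c ih =>
      have hlen : (ds ++ [c]).length = ds.length + 1 := by simp
      rw [hlen, List.range_succ, List.map_append, List.sum_append]
      have h1 : (List.range ds.length).map (pvCtbA (ds ++ [c]))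
          = (List.range ds.length).map (pvCtbA ds) := by
        apply List.map_congr_left
        intro i hi
        rw [List.mem_range] at hi
        unfold pvCtbA
        rw [List.getD_append _ _ _ _ hi, List.getD_append _ _ _ _ (by omega)]
      have h2 : pvCtbA (ds ++ [c]) ds.length = pvCtb ds.getLast? c := by
        unfold pvCtbA
        have hc : (ds ++ [c]).getD ds.length ' ' = c := by
          rw [List.getD_append_right _ _ _ _ (le_refl _)]
          simp
        rw [hc]
        by_cases h0 : ds.length = 0
        · have : ds = [] := List.length_eq_zero_iff.mp h0
          subst this
          simp
        · rw [if_neg h0, List.getD_append _ _ _ _ (by omega),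
              ← pv_last_getD ds (by intro hh; subst hh; simp at h0)]
      rw [h1, List.map_singleton, List.sum_singleton, h2, ih, pv_go_append]
      simp

theorem pv_A_eq (s : String) : solution s = pvGo none s.toList := by
  unfold solution
  rw [pv_A_foldl]
  rw [pv_range_sum]
  simp

-- ---- B side ----
theorem pv_fold_build (cs : List Char) (runs : List (List Char)) (cur : List Char) :
    (let st := cs.foldl
        (fun (st : List (List Char) × List Char) ch =>
          if PySem.Chars.isdigit ch then (st.1, st.2 ++ [ch])
          else (if st.2 ≠ [] then st.1 ++ [st.2] else st.1, []))
        (runs, cur)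
     if st.2 ≠ [] then st.1 ++ [st.2] else st.1) = runs ++ pvBuild cur cs := by
  induction cs generalizing runs cur with
  | nil => simp only [List.foldl_nil, pvBuild]; split_ifs <;> simp
  | cons ch t ih =>
      simp only [List.foldl_cons, pvBuild]
      by_cases hd : PySem.Chars.isdigit ch = true
      · simp only [if_pos hd]
        exact ih runs (cur ++ [ch])
      · simp only [if_neg hd]
        rw [ih _ []]
        split_ifs <;> simp

-- the run score, via the pieces of B's inner loop
theorem pv_pair_eq (g : List Char) (j : Nat) (hj : 1 ≤ j) :
    pvPair g j = (PySem.Int.ofChars? ((g.drop (j - 1)).take 2)).getD 0 := by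
  unfold pvPair
  have h1 : ((j : Int) - 1) = ((j - 1 : Nat) : Int) := by omega
  have h2 : ((j : Int) + 1) = (((j - 1) + 2 : Nat) : Int) := by omega
  rw [h1, h2, PySem.List.slice_natCast]
  have h3 : (j - 1 + 2) - (j - 1) = 2 := by omega
  rw [h3]

theorem pv_foldl_add {α : Type} (l : List α) (h : α → Int) (a : Int) :
    l.foldl (fun t x => t + h x) a = a + (l.map h).sum := by
  induction l generalizing a with
  | nil => simp
  | cons x t ih => rw [List.foldl_cons, ih, List.map_cons, List.sum_cons]; ring

theorem pv_score_append (cur : List Char) (c : Char)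
    (hcur : ∀ x ∈ cur, PySem.Chars.isdigit x = true) (hc : PySem.Chars.isdigit c = true) :
    pvScore (cur ++ [c]) = pvSB cur + pvCtb cur.getLast? c := by
  by_cases hne : cur = []
  · subst hne
    simp [pvScore, pvSB, pvCtb, hc, pv_digit1 c hc]
  · have hlen1 : 1 ≤ cur.length := List.length_pos_iff.mpr hne
    have hlen : (cur ++ [c]).length - 1 = (cur.length - 1) + 1 := by simp; omega
    unfold pvScore
    rw [hlen, List.range'_concat]
    have hhead : (cur ++ [c]).headD ' ' = cur.headD ' ' := by
      cases cur with
      | nil => exact absurd rfl hne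
      | cons d t => rfl
    have h1 : (List.range' 1 (cur.length - 1)).map (pvPair (cur ++ [c]))
        = (List.range' 1 (cur.length - 1)).map (pvPair cur) := by
      apply List.map_congr_left
      intro j hj
      rw [List.mem_range'] at hj
      obtain ⟨hj1, hj2⟩ := hj
      have hj1' : 1 ≤ j := by omega
      rw [pv_pair_eq _ _ hj1', pv_pair_eq _ _ hj1']
      rw [List.drop_append_of_le_length (by omega),
          List.take_append_of_le_length (by simp; omega)]
    have hlast : pvPair (cur ++ [c]) (1 + 1 * (cur.length - 1))
        = 10 * pvDv (cur.getLast hne) + pvDv c := by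
      have he : 1 + 1 * (cur.length - 1) = cur.length := by omega
      rw [he, pv_pair_eq _ _ hlen1,
          List.drop_append_of_le_length (by omega),
          List.drop_length_sub_one hne]
      simp [pv_digit2 _ _ (hcur _ (List.getLast_mem hne)) hc]
    rw [List.map_append, List.sum_append, List.map_singleton, List.sum_singleton, h1, hlast,
        hhead]
    rw [List.getLast?_eq_some_getLast hne]
    unfold pvSB pvScore pvCtb
    rw [if_pos hne]
    simp [hc, hcur _ (List.getLast_mem hne)]
    ring

theorem pv_sb_concat (cur : List Char) (c : Char) : pvSB (cur ++ [c]) = pvScore (cur ++ [c]) := by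
  unfold pvSB
  rw [if_pos (by simp)]

theorem pv_B_main (cs : List Char) (cur : List Char)
    (hcur : ∀ x ∈ cur, PySem.Chars.isdigit x = true) :
    ((pvBuild cur cs).map pvScore).sum = pvSB cur + pvGo cur.getLast? cs := by
  induction cs generalizing cur with
  | nil =>
      simp only [pvBuild, pvGo]
      unfold pvSB
      split_ifs <;> simp
  | cons c t ih =>
      simp only [pvBuild, pvGo]
      by_cases hd : PySem.Chars.isdigit c = true
      · rw [if_pos hd]
        have hall : ∀ x ∈ cur ++ [c], PySem.Chars.isdigit x = true := by
          intro x hx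
          rcases List.mem_append.mp hx with h | h
          · exact hcur x h
          · simp at h; subst h; exact hd
        rw [ih (cur ++ [c]) hall]
        rw [pv_sb_concat, pv_score_append cur c hcur hd, List.getLast?_concat]
        ring
      · rw [if_neg hd]
        rw [List.map_append, List.sum_append, ih [] (by intro x hx; simp at hx)]
        have hz : pvCtb cur.getLast? c = 0 := by
          unfold pvCtb
          cases cur.getLast? <;> simp [hd]
        rw [pv_go_skip c t (by simpa using hd), hz]
        have h1 : ((if cur ≠ [] then [cur] else ([] : List (List Char))).map pvScore).sum
            = pvSB cur := by
          unfold pvSB; split_ifs <;> simp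
        rw [h1]
        simp [pvSB]

theorem pv_B_eq (s : String) : solution_alt s = pvGo none s.toList := by
  unfold solution_alt
  have hbody : (fun (total : Int) (g : List Char) =>
      let total := total + (PySem.Int.ofChars? [g.headD ' ']).getD 0
      (List.range' 1 (g.length - 1)).foldl
        (fun (total : Int) (j : Nat) =>
          total + (PySem.Int.ofChars? (PySem.List.slice g (some ((j : Int) - 1)) (some ((j : Int) + 1)))).getD 0)
        total) = fun total g => total + pvScore g := by
    funext total g
    show (List.range' 1 (g.length - 1)).foldl (fun t j => t + pvPair g j) (total + _) = _
    rw [pv_foldl_add _ (pvPair g)]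
    unfold pvScore
    ring
  show (if _ ≠ [] then _ ++ [_] else _).foldl _ 0 = _
  rw [pv_fold_build s.toList [] [], hbody, pv_foldl_add _ pvScore 0, List.nil_append]
  rw [pv_B_main s.toList [] (by intro x hx; simp at hx)]
  simp [pvSB]

-- ===== VERDICT (by name: the statement is the Claim_ definition above) =====
theorem solution_spec : Claim_equal_solution := by
  intro s _
  unfold Spec_solution
  rw [pv_A_eq, pv_B_eq]
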